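-- pv_equiv track=rewrite | github.com/ocansino/MtgTransformer | baselines.py | train_bigram_baseline
-- ===== SOURCE A (Python) =====
-- from collections import Counter
-- from typing import Dict, List, Tuple
--
-- def train_bigram_baseline(train_sequences: List[List[str]]) -> Tuple[Dict[str, str], Dict[str, Counter]]:
--     """
--     Train a bigram baseline:
--     predict the next card using only the immediately previous card.
--
--     Returns:
--         next_card_map: maps previous_card -> most common next card
--         bigram_counters: maps previous_card -> Counter of next cards
--     """
--     bigram_counters: Dict[str, Counter] = {}
--
--     for seq in train_sequences:
--         for i in range(1, len(seq)):
--             prev_card = seq[i - 1]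
--             next_card = seq[i]
--
--             if prev_card not in bigram_counters:
--                 bigram_counters[prev_card] = Counter()
--
--             bigram_counters[prev_card].update([next_card])
--
--     next_card_map = {
--         prev_card: counter.most_common(1)[0][0]
--         for prev_card, counter in bigram_counters.items()
--     }
--
--     return next_card_map, bigram_counters
-- ===== SOURCE B (Python) =====
-- from collections import Counter
-- from typing import Dict, List, Tuple
--
-- def train_bigram_baseline(train_sequences: List[List[str]]) -> Tuple[Dict[str, str], Dict[str, Counter]]:
--     # One flat Counter keyed by (prev, next) pairs, regrouped afterwards.
--     flat: Counter = Counter()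
--     for seq in train_sequences:
--         for prev_card, next_card in zip(seq, seq[1:]):
--             flat[(prev_card, next_card)] += 1
--
--     bigram_counters: Dict[str, Counter] = {}
--     for (prev_card, next_card), count in flat.items():
--         if prev_card not in bigram_counters:
--             bigram_counters[prev_card] = Counter()
--         bigram_counters[prev_card][next_card] = count
--
--     next_card_map = {
--         prev_card: counter.most_common(1)[0][0]
--         for prev_card, counter in bigram_counters.items()
--     }
--
--     return next_card_map, bigram_counters
-- ===== Notes on version B (the rewrite author's own statement) =====
-- stated objective: alternative
-- what changed: Instead of building the nested dict-of-Counters while scanning, B counts all bigrams in a single flat Counter keyed by (prev, next) tuples and then regroups that flat counter's items into the nested dict, which preserves first-appearance insertion order so most_common tie-breaking matches exactly.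
import Mathlib
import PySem

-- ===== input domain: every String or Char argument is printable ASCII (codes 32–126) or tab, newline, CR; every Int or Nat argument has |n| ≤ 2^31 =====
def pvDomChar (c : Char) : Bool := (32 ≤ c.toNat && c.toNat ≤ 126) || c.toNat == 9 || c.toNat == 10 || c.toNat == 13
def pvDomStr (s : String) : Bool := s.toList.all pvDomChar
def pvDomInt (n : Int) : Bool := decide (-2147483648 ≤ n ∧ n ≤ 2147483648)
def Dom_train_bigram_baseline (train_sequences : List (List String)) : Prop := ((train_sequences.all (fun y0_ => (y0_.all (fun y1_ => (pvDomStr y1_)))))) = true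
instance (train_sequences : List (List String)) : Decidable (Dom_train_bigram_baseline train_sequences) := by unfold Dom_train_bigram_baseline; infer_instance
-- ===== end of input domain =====

-- B counts all bigrams in one flat (prev,next)-keyed counter and regroups it afterwards,
-- instead of maintaining the nested dict of counters while scanning; same cost, alternative structure.

-- Shared helper: both Pythons compute `counter.most_common(1)[0][0]` (first key with maximal count).
def pvMostCommon1 (c : PySem.Dict String Int) : String :=
  ((PySem.List.max? c.items (fun p => p.2)).map (fun p => p.1)).getD ""

-- ===== PORT A =====
def train_bigram_baseline (train_sequences : List (List String)) :
    (List (String × String)) × (List (String × List (String × Int))) :=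
  let bc : PySem.Dict String (PySem.Dict String Int) :=
    train_sequences.foldl (fun bc seq =>
      (PySem.List.pyRange 1 (seq.length : Int)).foldl (fun bc i =>
        let prev := PySem.List.pyGetD seq (i - 1) ""
        let nxt := PySem.List.pyGetD seq i ""
        let bc := if bc.contains prev then bc else bc.insert prev PySem.Dict.empty
        bc.modify prev PySem.Dict.empty (fun c => c.modify nxt 0 (· + 1))) bc)
      PySem.Dict.empty
  let ncm : PySem.Dict String String :=
    bc.items.foldl (fun m p => m.insert p.1 (pvMostCommon1 p.2)) PySem.Dict.empty
  (ncm.items, bc.items.map (fun p => (p.1, p.2.items)))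

-- ===== PORT B =====
def train_bigram_baseline_alt (train_sequences : List (List String)) :
    (List (String × String)) × (List (String × List (String × Int))) :=
  let flat : PySem.Dict (String × String) Int :=
    train_sequences.foldl (fun f seq =>
      (seq.zip (PySem.List.slice seq (some 1))).foldl
        (fun f pn => f.modify pn 0 (· + 1)) f) PySem.Dict.empty
  let bc : PySem.Dict String (PySem.Dict String Int) :=
    flat.items.foldl (fun bc e =>
      let bc := if bc.contains e.1.1 then bc else bc.insert e.1.1 PySem.Dict.empty
      bc.modify e.1.1 PySem.Dict.empty (fun c => c.insert e.1.2 e.2)) PySem.Dict.empty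
  let ncm : PySem.Dict String String :=
    bc.items.foldl (fun m p => m.insert p.1 (pvMostCommon1 p.2)) PySem.Dict.empty
  (ncm.items, bc.items.map (fun p => (p.1, p.2.items)))

-- ===== PRECONDITION & SPEC =====
def Spec_train_bigram_baseline (train_sequences : List (List String)) (out : (List (String × String)) × (List (String × List (String × Int)))) : Prop := out = train_bigram_baseline_alt train_sequences
instance (train_sequences : List (List String)) (out : (List (String × String)) × (List (String × List (String × Int)))) : Decidable (Spec_train_bigram_baseline train_sequences out) := by unfold Spec_train_bigram_baseline; infer_instance

-- ===== CLAIM (what is proved, stated in full; the proofs are below) =====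
def Claim_equal_train_bigram_baseline : Prop := ∀ (train_sequences : List (List String)), Dom_train_bigram_baseline train_sequences → Spec_train_bigram_baseline train_sequences (train_bigram_baseline train_sequences)

-- ===== LEMMAS AND PROOFS =====

-- A's per-pair step (the body of A's inner loop, on a (prev, next) pair).
def pvStepA (bc : PySem.Dict String (PySem.Dict String Int)) (q : String × String) :
    PySem.Dict String (PySem.Dict String Int) :=
  let bc1 := if bc.contains q.1 then bc else bc.insert q.1 PySem.Dict.empty
  bc1.modify q.1 PySem.Dict.empty (fun c => c.modify q.2 0 (· + 1))

-- B's regrouping step (the body of B's second loop, on a ((prev, next), count) item).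
def pvStepB (bc : PySem.Dict String (PySem.Dict String Int)) (e : (String × String) × Int) :
    PySem.Dict String (PySem.Dict String Int) :=
  let bc1 := if bc.contains e.1.1 then bc else bc.insert e.1.1 PySem.Dict.empty
  bc1.modify e.1.1 PySem.Dict.empty (fun c => c.insert e.1.2 e.2)

theorem pvRange_one (n : Nat) :
    PySem.List.pyRange 1 (n : Int) = (List.range (n - 1)).map (fun k : Nat => 1 + (k : Int)) := by
  unfold PySem.List.pyRange
  norm_num
  rcases Nat.lt_or_ge 1 n with h2 | h2
  · rw [if_pos (by exact_mod_cast h2)]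
  · rw [if_neg (by exact_mod_cast Nat.not_lt.mpr h2)]
    have : n - 1 = 0 := by omega
    simp [this]

theorem pvZipIdxFold {δ : Type} (g : δ → String → String → δ) :
    ∀ (xs : List String) (d : δ),
      (List.range (xs.length - 1)).foldl (fun d k => g d (xs.getD k "") (xs.getD (k + 1) "")) d
        = (xs.zip xs.tail).foldl (fun d q => g d q.1 q.2) d := by
  intro xs
  induction xs with
  | nil => simp
  | cons a t ih =>
    cases t with
    | nil => simp
    | cons b t' =>
      intro d
      simp only [List.length_cons, Nat.add_sub_cancel, List.range_succ_eq_map,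
        List.foldl_cons, List.foldl_map, List.tail_cons, List.zip_cons_cons]
      simp only [List.getD_cons_zero, List.getD_cons_succ]
      have ih' := ih (g d a b)
      simp only [List.length_cons, Nat.add_sub_cancel, List.tail_cons,
        List.getD_cons_succ] at ih'
      exact ih'

theorem pvStepA_getD (bc : PySem.Dict String (PySem.Dict String Int)) (q : String × String) (p : String) :
    (pvStepA bc q).getD p PySem.Dict.empty
      = if p = q.1 then (bc.getD q.1 PySem.Dict.empty).modify q.2 0 (· + 1)
        else bc.getD p PySem.Dict.empty := by
  unfold pvStepA
  by_cases hc : bc.contains q.1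
  · simp only [hc, if_true, PySem.Dict.getD_modify]
  · rw [if_neg hc, PySem.Dict.getD_modify]
    split_ifs with h
    · subst h
      rw [PySem.Dict.getD_insert_self, PySem.Dict.getD_of_not_contains bc _ (by simpa using hc)]
    · rw [PySem.Dict.getD_insert, if_neg h]

theorem pvStepB_getD (bc : PySem.Dict String (PySem.Dict String Int)) (e : (String × String) × Int) (p : String) :
    (pvStepB bc e).getD p PySem.Dict.empty
      = if p = e.1.1 then (bc.getD e.1.1 PySem.Dict.empty).insert e.1.2 e.2
        else bc.getD p PySem.Dict.empty := by
  unfold pvStepB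
  by_cases hc : bc.contains e.1.1
  · simp only [hc, if_true, PySem.Dict.getD_modify]
  · rw [if_neg hc, PySem.Dict.getD_modify]
    split_ifs with h
    · subst h
      rw [PySem.Dict.getD_insert_self, PySem.Dict.getD_of_not_contains bc _ (by simpa using hc)]
    · rw [PySem.Dict.getD_insert, if_neg h]

theorem pvStepA_keys (bc : PySem.Dict String (PySem.Dict String Int)) (q : String × String) :
    (pvStepA bc q).keys = PySem.Set.add bc.keys q.1 := by
  unfold pvStepA PySem.Set.add
  by_cases hc : bc.contains q.1
  · have hm : q.1 ∈ bc.keys := by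
      have := PySem.Dict.contains_eq_decide_mem_keys bc q.1
      rw [hc] at this; exact of_decide_eq_true this.symm
    simp only [hc, if_true, PySem.Dict.keys_modify,
      PySem.Dict.keys_insert_of_contains _ _ hc]
    rw [if_pos (by simpa using hm)]
  · have hm : q.1 ∉ bc.keys := by
      have := PySem.Dict.contains_eq_decide_mem_keys bc q.1
      rw [eq_false_of_ne_true hc] at this
      exact of_decide_eq_false this.symm
    rw [if_neg hc, PySem.Dict.keys_modify]
    rw [PySem.Dict.keys_insert_of_contains _ _ (by simp),
      PySem.Dict.keys_insert_of_not_contains _ _ (by simpa using hc)]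
    rw [if_neg (by simpa using hm)]

theorem pvStepB_keys (bc : PySem.Dict String (PySem.Dict String Int)) (e : (String × String) × Int) :
    (pvStepB bc e).keys = PySem.Set.add bc.keys e.1.1 := by
  unfold pvStepB PySem.Set.add
  by_cases hc : bc.contains e.1.1
  · have hm : e.1.1 ∈ bc.keys := by
      have := PySem.Dict.contains_eq_decide_mem_keys bc e.1.1
      rw [hc] at this; exact of_decide_eq_true this.symm
    simp only [hc, if_true, PySem.Dict.keys_modify,
      PySem.Dict.keys_insert_of_contains _ _ hc]
    rw [if_pos (by simpa using hm)]
  · have hm : e.1.1 ∉ bc.keys := by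
      have := PySem.Dict.contains_eq_decide_mem_keys bc e.1.1
      rw [eq_false_of_ne_true hc] at this
      exact of_decide_eq_false this.symm
    rw [if_neg hc, PySem.Dict.keys_modify]
    rw [PySem.Dict.keys_insert_of_contains _ _ (by simp),
      PySem.Dict.keys_insert_of_not_contains _ _ (by simpa using hc)]
    rw [if_neg (by simpa using hm)]

theorem pvInnerA {δ : Type} (g : δ → String → String → δ) (xs : List String) (d : δ) :
    (PySem.List.pyRange 1 (xs.length : Int)).foldl
        (fun d i => g d (PySem.List.pyGetD xs (i - 1) "") (PySem.List.pyGetD xs i "")) d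
      = (xs.zip xs.tail).foldl (fun d q => g d q.1 q.2) d := by
  rw [pvRange_one, List.foldl_map]
  have hbody : ∀ (d : δ) (k : Nat),
      g d (PySem.List.pyGetD xs (1 + (k : Int) - 1) "") (PySem.List.pyGetD xs (1 + (k : Int)) "")
        = g d (xs.getD k "") (xs.getD (k + 1) "") := by
    intro d k
    have h1 : (1 + (k : Int) - 1) = ((k : Nat) : Int) := by ring
    have h2 : (1 + (k : Int)) = (((k + 1 : Nat) : Int)) := by push_cast [Nat.cast_add]; ring
    rw [h1, h2, PySem.List.pyGetD_natCast, PySem.List.pyGetD_natCast]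
  have hfun : (fun (x : δ) (y : Nat) => g x (PySem.List.pyGetD xs (1 + (y : Int) - 1) "") (PySem.List.pyGetD xs (1 + (y : Int)) ""))
      = (fun (x : δ) (y : Nat) => g x (xs.getD y "") (xs.getD (y + 1) "")) := funext fun x => funext fun y => hbody x y
  rw [hfun]
  exact pvZipIdxFold g xs d

def pvPairs (ts : List (List String)) : List (String × String) :=
  ts.flatMap (fun s => s.zip s.tail)

theorem pvFlatten {δ : Type} (f : δ → String × String → δ) (ts : List (List String)) :
    ∀ (d : δ), ts.foldl (fun d s => (s.zip s.tail).foldl f d) d = (pvPairs ts).foldl f d := by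
  induction ts with
  | nil => intro d; simp [pvPairs]
  | cons s ts ih =>
    intro d
    simp only [pvPairs, List.flatMap_cons, List.foldl_cons, List.foldl_append]
    exact ih _

theorem pvFoldA_getD (ps : List (String × String)) :
    ∀ (bc : PySem.Dict String (PySem.Dict String Int)) (p : String),
      (ps.foldl pvStepA bc).getD p PySem.Dict.empty
        = ((ps.filter (fun q => q.1 == p)).map (fun q => q.2)).foldl
            (fun c n => c.modify n 0 (· + 1)) (bc.getD p PySem.Dict.empty) := by
  induction ps with
  | nil => intro bc p; simp
  | cons q ps ih =>
    intro bc p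
    simp only [List.foldl_cons, List.filter_cons]
    rw [ih]
    by_cases h : q.1 = p
    · simp only [h, beq_self_eq_true, if_pos, List.map_cons, List.foldl_cons]
      rw [pvStepA_getD, if_pos h.symm, h]
    · have : (q.1 == p) = false := by simp [h]
      simp only [this, Bool.false_eq_true, if_false]
      rw [pvStepA_getD, if_neg (fun hh => h hh.symm)]

theorem pvFoldB_getD (l : List ((String × String) × Int)) :
    ∀ (bc : PySem.Dict String (PySem.Dict String Int)) (p : String),
      (l.foldl pvStepB bc).getD p PySem.Dict.empty
        = ((l.filter (fun e => e.1.1 == p)).map (fun e => (e.1.2, e.2))).foldl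
            (fun c en => c.insert en.1 en.2) (bc.getD p PySem.Dict.empty) := by
  induction l with
  | nil => intro bc p; simp
  | cons e l ih =>
    intro bc p
    simp only [List.foldl_cons, List.filter_cons]
    rw [ih]
    by_cases h : e.1.1 = p
    · simp only [h, beq_self_eq_true, if_pos, List.map_cons, List.foldl_cons]
      rw [pvStepB_getD, if_pos h.symm, h]
    · have : (e.1.1 == p) = false := by simp [h]
      simp only [this, Bool.false_eq_true, if_false]
      rw [pvStepB_getD, if_neg (fun hh => h hh.symm)]

theorem pvFoldA_keys (ps : List (String × String)) :
    ∀ (bc : PySem.Dict String (PySem.Dict String Int)),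
      (ps.foldl pvStepA bc).keys = PySem.Set.update bc.keys (ps.map (fun q => q.1)) := by
  induction ps with
  | nil => intro bc; simp [PySem.Set.update]
  | cons q ps ih =>
    intro bc
    simp only [List.foldl_cons, List.map_cons, PySem.Set.update, ih, pvStepA_keys]

theorem pvFoldB_keys (l : List ((String × String) × Int)) :
    ∀ (bc : PySem.Dict String (PySem.Dict String Int)),
      (l.foldl pvStepB bc).keys = PySem.Set.update bc.keys (l.map (fun e => e.1.1)) := by
  induction l with
  | nil => intro bc; simp [PySem.Set.update]
  | cons e l ih =>
    intro bc
    simp only [List.foldl_cons, List.map_cons, PySem.Set.update, ih, pvStepB_keys]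

theorem pvOfList_snoc {α : Type} [BEq α] (l : List α) (x : α) :
    PySem.Set.ofList (l ++ [x]) = PySem.Set.add (PySem.Set.ofList l) x := by
  simp [PySem.Set.ofList_eq_foldl, List.foldl_append]

theorem pvAdd_of_mem {α : Type} [BEq α] [LawfulBEq α] (s : PySem.Set α) (x : α) (h : x ∈ s) :
    PySem.Set.add s x = s := by
  unfold PySem.Set.add PySem.Set.contains
  rw [if_pos (by simpa using h)]

theorem pvAdd_of_not_mem {α : Type} [BEq α] [LawfulBEq α] (s : PySem.Set α) (x : α) (h : x ∉ s) :
    PySem.Set.add s x = s ++ [x] := by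
  unfold PySem.Set.add PySem.Set.contains
  rw [if_neg (by simpa using h)]

theorem pvSet_add_filter {α : Type} [BEq α] [LawfulBEq α] (pr : α → Bool) (s : List α) (x : α) :
    (PySem.Set.add s x).filter pr
      = if pr x then PySem.Set.add (s.filter pr) x else s.filter pr := by
  by_cases hx : x ∈ s
  · rw [pvAdd_of_mem s x hx]
    by_cases hp : pr x
    · rw [if_pos hp, pvAdd_of_mem _ x (List.mem_filter.mpr ⟨hx, hp⟩)]
    · rw [if_neg hp]
  · rw [pvAdd_of_not_mem s x hx, List.filter_append]
    by_cases hp : pr x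
    · rw [if_pos hp, pvAdd_of_not_mem _ x (fun hm => hx (List.mem_filter.mp hm).1)]
      simp [hp]
    · rw [if_neg hp]
      simp [hp]

theorem pvOfList_filter {α : Type} [BEq α] [LawfulBEq α] (pr : α → Bool) :
    ∀ (l : List α), (PySem.Set.ofList l).filter pr = PySem.Set.ofList (l.filter pr) := by
  intro l
  induction l using List.reverseRecOn with
  | nil => rfl
  | append_singleton l x ih =>
    rw [pvOfList_snoc, pvSet_add_filter, List.filter_append]
    by_cases hp : pr x
    · rw [if_pos hp]
      simp only [List.filter_cons, hp, if_pos, List.filter_nil]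
      rw [pvOfList_snoc, ih]
    · rw [if_neg hp]
      simp only [List.filter_cons, hp, Bool.false_eq_true, if_false, List.filter_nil,
        List.append_nil]
      exact ih

theorem pvOfList_map_snd (p : String) :
    ∀ (l : List (String × String)), (∀ q ∈ l, q.1 = p) →
      PySem.Set.ofList (l.map (fun q => q.2)) = (PySem.Set.ofList l).map (fun q => q.2) := by
  intro l
  induction l using List.reverseRecOn with
  | nil => intro _; rfl
  | append_singleton l x ih =>
    intro h
    have hl : ∀ q ∈ l, q.1 = p := fun q hq => h q (List.mem_append_left _ hq)
    have hx : x.1 = p := h x (by simp)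
    rw [List.map_append, List.map_singleton, pvOfList_snoc, pvOfList_snoc, ih hl]
    by_cases hm : x ∈ PySem.Set.ofList l
    · rw [pvAdd_of_mem _ x hm, pvAdd_of_mem _ x.2 (List.mem_map.mpr ⟨x, hm, rfl⟩)]
    · rw [pvAdd_of_not_mem _ x hm, pvAdd_of_not_mem _ x.2 ?_, List.map_append,
        List.map_singleton]
      intro hm2
      rcases List.mem_map.mp hm2 with ⟨q, hq, hq2⟩
      have hq1 : q.1 = p := hl q ((PySem.Set.mem_ofList l q).mp hq)
      have : q = x := Prod.ext (hq1.trans hx.symm) hq2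
      exact hm (this ▸ hq)

theorem pvOfList_map_ofList {α β : Type} [BEq α] [LawfulBEq α] [BEq β] [LawfulBEq β] (g : α → β) :
    ∀ (l : List α), PySem.Set.ofList ((PySem.Set.ofList l).map g) = PySem.Set.ofList (l.map g) := by
  intro l
  induction l using List.reverseRecOn with
  | nil => rfl
  | append_singleton l x ih =>
    rw [pvOfList_snoc, List.map_append, List.map_singleton, pvOfList_snoc]
    by_cases hm : x ∈ PySem.Set.ofList l
    · rw [pvAdd_of_mem _ x hm, ih, pvAdd_of_mem _ (g x) ?_]
      have : x ∈ l := (PySem.Set.mem_ofList l x).mp hm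
      exact (PySem.Set.mem_ofList _ (g x)).mpr (List.mem_map.mpr ⟨x, this, rfl⟩)
    · rw [pvAdd_of_not_mem _ x hm, List.map_append, List.map_singleton, pvOfList_snoc, ih]

theorem pvCount_pair (p : String) (n : String) :
    ∀ (l : List (String × String)),
      l.count (p, n) = ((l.filter (fun q => q.1 == p)).map (fun q => q.2)).count n := by
  intro l
  induction l with
  | nil => rfl
  | cons q l ih =>
    simp only [List.count_cons, List.filter_cons]
    by_cases h1 : q.1 = p
    · simp only [h1, beq_self_eq_true, if_pos, List.map_cons, List.count_cons, ih]
      by_cases h2 : q.2 = n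
      · have : q = (p, n) := Prod.ext h1 h2
        simp [this]
      · have hq : (q == (p, n)) = false := by
          simp [Prod.ext_iff]; intro _; exact h2
        have hn : (q.2 == n) = false := by simp [h2]
        simp [hq, hn]
    · have hb : (q.1 == p) = false := by simp [h1]
      have hq : (q == (p, n)) = false := by
        simp [Prod.ext_iff]; intro h; exact absurd h h1
      simp [hb, hq, ih]

theorem pvUpdate_nil {α : Type} [BEq α] (xs : List α) :
    PySem.Set.update ([] : List α) xs = PySem.Set.ofList xs := by
  rw [PySem.Set.ofList_eq_foldl]; rfl

theorem pvBC_eq (P : List (String × String)) :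
    P.foldl pvStepA PySem.Dict.empty
      = ((PySem.Dict.counter P).items).foldl pvStepB PySem.Dict.empty := by
  have hItems : (PySem.Dict.counter P).items
      = (PySem.Set.ofList P).map (fun q => (q, (List.count q P : Int))) :=
    PySem.Dict.items_counter P
  have hKA : (P.foldl pvStepA PySem.Dict.empty).keys
      = PySem.Set.ofList (P.map (fun q => q.1)) := by
    rw [pvFoldA_keys, PySem.Dict.keys_empty, pvUpdate_nil]
  have hKB : (((PySem.Dict.counter P).items).foldl pvStepB PySem.Dict.empty).keys
      = PySem.Set.ofList (P.map (fun q => q.1)) := by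
    rw [pvFoldB_keys, PySem.Dict.keys_empty, pvUpdate_nil, hItems, List.map_map]
    have : ((fun (e : (String × String) × Int) => e.1.1) ∘ (fun q => (q, (List.count q P : Int))))
        = (fun (q : String × String) => q.1) := rfl
    rw [this, pvOfList_map_ofList]
  have hNA : (P.foldl pvStepA PySem.Dict.empty).keys.Nodup := by
    rw [hKA]; exact PySem.Set.nodup_ofList _
  have hNB : (((PySem.Dict.counter P).items).foldl pvStepB PySem.Dict.empty).keys.Nodup := by
    rw [hKB]; exact PySem.Set.nodup_ofList _
  apply PySem.Dict.ext
  rw [PySem.Dict.items_eq_map_keys _ hNA PySem.Dict.empty,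
    PySem.Dict.items_eq_map_keys _ hNB PySem.Dict.empty, hKA, hKB]
  apply List.map_congr_left
  intro p hp
  have hgd : (P.foldl pvStepA PySem.Dict.empty).getD p PySem.Dict.empty
      = (((PySem.Dict.counter P).items).foldl pvStepB PySem.Dict.empty).getD p PySem.Dict.empty := by
    rw [pvFoldA_getD, pvFoldB_getD]
    simp only [PySem.Dict.getD_empty]
    -- names
    set Np := (P.filter (fun q => q.1 == p)).map (fun q => q.2) with hNp
    have hLp : (((PySem.Dict.counter P).items).filter (fun e => e.1.1 == p)).map
          (fun e => (e.1.2, e.2))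
        = (PySem.Set.ofList (P.filter (fun q => q.1 == p))).map
            (fun q => (q.2, (List.count q P : Int))) := by
      rw [hItems, List.filter_map]
      have hco : ((fun (e : (String × String) × Int) => e.1.1 == p)
          ∘ (fun q => (q, (List.count q P : Int)))) = (fun (q : String × String) => q.1 == p) := rfl
      rw [hco, List.map_map, pvOfList_filter]
      rfl
    have hmemF : ∀ q ∈ P.filter (fun q => q.1 == p), q.1 = p := by
      intro q hq
      have := (List.mem_filter.mp hq).2
      simpa using this
    have hmemS : ∀ q ∈ PySem.Set.ofList (P.filter (fun q => q.1 == p)), q.1 = p := by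
      intro q hq
      exact hmemF q ((PySem.Set.mem_ofList _ q).mp hq)
    -- LHS is the counter of Np
    rw [show (Np.foldl (fun c n => c.modify n 0 (· + 1)) PySem.Dict.empty)
        = PySem.Dict.counter Np from (PySem.Dict.counter_eq_foldl Np).symm]
    rw [hLp]
    -- RHS: fold of inserts with fresh distinct keys from empty
    have hfresh : ∀ a ∈ (PySem.Set.ofList (P.filter (fun q => q.1 == p))).map
        (fun q => (q.2, (List.count q P : Int))),
        (PySem.Dict.empty : PySem.Dict String Int).contains a.1 = false := by
      intro a _; exact PySem.Dict.contains_empty _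
    have hnodup : (((PySem.Set.ofList (P.filter (fun q => q.1 == p))).map
        (fun q => (q.2, (List.count q P : Int)))).map (fun a => a.1)).Nodup := by
      rw [List.map_map]
      have hco : ((fun (a : String × Int) => a.1) ∘ (fun (q : String × String) =>
          (q.2, (List.count q P : Int)))) = (fun (q : String × String) => q.2) := rfl
      rw [hco]
      refine List.Nodup.map_on ?_ (PySem.Set.nodup_ofList _)
      intro x hx y hy hxy
      exact Prod.ext ((hmemS x hx).trans (hmemS y hy).symm) hxy
    apply PySem.Dict.ext
    rw [PySem.Dict.items_foldl_insert_fresh _ _ _ _ hfresh hnodup]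
    rw [PySem.Dict.items_counter]
    -- LHS: items of counter Np
    rw [hNp, pvOfList_map_snd p _ hmemF, List.map_map, List.map_map]
    simp only [PySem.Dict.empty, List.nil_append]
    apply List.map_congr_left
    intro q hq
    have hq1 : q.1 = p := hmemS q hq
    have : List.count q P = List.count q.2 Np := by
      rw [hNp]
      have := pvCount_pair p q.2 P
      rw [show ((p, q.2) : String × String) = q from Prod.ext hq1.symm rfl] at this
      simpa using this
    simp [Function.comp, this]
    rw [hNp]
  rw [hgd]

-- ===== VERDICT (by name: the statement is the Claim_ definition above) =====
theorem train_bigram_baseline_spec : Claim_equal_train_bigram_baseline := by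
  intro ts _
  show train_bigram_baseline ts = train_bigram_baseline_alt ts
  unfold train_bigram_baseline train_bigram_baseline_alt
  have hseq : ∀ (seq : List String) (bc : PySem.Dict String (PySem.Dict String Int)),
      (PySem.List.pyRange 1 (seq.length : Int)).foldl (fun bc i =>
        let prev := PySem.List.pyGetD seq (i - 1) ""
        let nxt := PySem.List.pyGetD seq i ""
        let bc := if bc.contains prev then bc else bc.insert prev PySem.Dict.empty
        bc.modify prev PySem.Dict.empty (fun c => c.modify nxt 0 (· + 1))) bc
      = (seq.zip seq.tail).foldl pvStepA bc :=
    fun seq bc => pvInnerA (fun d p n => pvStepA d (p, n)) seq bc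
  have hslice : ∀ (seq : List String), PySem.List.slice seq (some 1) = seq.tail := by
    intro seq
    rw [PySem.List.slice_from seq (by norm_num : (0 : Int) ≤ (1 : Int))]
    simp [List.drop_one]
  simp only [hseq, hslice]
  rw [pvFlatten pvStepA ts, pvFlatten (fun f pn => PySem.Dict.modify f pn 0 (· + 1)) ts]
  rw [show (List.foldl (fun f pn => PySem.Dict.modify f pn 0 (· + 1)) PySem.Dict.empty (pvPairs ts))
      = PySem.Dict.counter (pvPairs ts) from (PySem.Dict.counter_eq_foldl _).symm]
  rw [show (fun (bc : PySem.Dict String (PySem.Dict String Int)) (e : (String × String) × Int) =>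
        let bc := if bc.contains e.1.1 then bc else bc.insert e.1.1 PySem.Dict.empty
        bc.modify e.1.1 PySem.Dict.empty (fun c => c.insert e.1.2 e.2)) = pvStepB from rfl]
  rw [pvBC_eq (pvPairs ts)]
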